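-- pv_equiv track=rewrite | github.com/Ollson2921/cperms_ins_enc | cperms_ins_enc/check_regular/check_regular_vert.py | inc_inc
-- ===== SOURCE A (Python) =====
-- def inc_inc(cperm: list[int], min_height: int = 0) -> bool:
--     """Returns True if the sequence is increasing on bottom
--     and increasing on top.
--     NOTE: input list must be a Cayley permutation.
--
--     Creates bottom sequence with the first values in cperm
--     that are at the same index as their value. The first value
--     that is not at the same index is added to the top sequence
--     and a line is drawn under it. Any other value must form an
--     increasing sequence above or below that line.
--     """
--     top_seq = []
--     bottom_seq = []
--     for idx, val in enumerate(cperm):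
--         if val == idx:
--             bottom_seq.append(val)
--         else:
--             top_seq.append(val)
--             if val < min_height:
--                 return False
--             break
--     if not top_seq:
--         return True
--     line = top_seq[0]
--     start_index = len(bottom_seq) + 1
--
--     for val in cperm[start_index:]:
--         if val < line:
--             if not bottom_seq:
--                 bottom_seq.append(val)
--             elif val <= bottom_seq[-1]:
--                 return False
--             bottom_seq.append(val)
--         else:
--             if val <= top_seq[-1]:
--                 return False
--             top_seq.append(val)
--     return True
-- ===== SOURCE B (Python) =====
-- def _strict_inc(xs):
--     return all(x < y for x, y in zip(xs, xs[1:]))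
--
--
-- def inc_inc(cperm: list[int], min_height: int = 0) -> bool:
--     k = 0
--     while k < len(cperm) and cperm[k] == k:
--         k += 1
--     rest = cperm[k:]
--     if not rest:
--         return True
--     line, *tail = rest
--     if line < min_height:
--         return False
--     bottom = list(range(k)) + [v for v in tail if v < line]
--     top = [line] + [v for v in tail if v >= line]
--     return _strict_inc(bottom) and _strict_inc(top)
-- ===== Notes on version B (the rewrite author's own statement) =====
-- stated objective: simpler
-- what changed: A's single interleaved pass with mutable bottom/top sequences and in-loop guards is replaced by: locate the fixed-point prefix, partition the tail around the line into below/above, rebuild the two sequences and check each strictly increasing with one small pairwise helper.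
import Mathlib
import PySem

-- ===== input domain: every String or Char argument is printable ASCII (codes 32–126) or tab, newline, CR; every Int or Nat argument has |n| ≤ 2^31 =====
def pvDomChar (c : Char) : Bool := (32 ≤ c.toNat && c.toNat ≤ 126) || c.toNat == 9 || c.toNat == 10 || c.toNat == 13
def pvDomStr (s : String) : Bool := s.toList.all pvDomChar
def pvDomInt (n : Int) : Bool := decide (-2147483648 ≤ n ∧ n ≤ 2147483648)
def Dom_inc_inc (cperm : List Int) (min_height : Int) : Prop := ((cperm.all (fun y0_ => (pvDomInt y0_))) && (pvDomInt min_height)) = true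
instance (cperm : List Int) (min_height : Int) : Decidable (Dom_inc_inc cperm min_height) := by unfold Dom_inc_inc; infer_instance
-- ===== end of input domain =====

-- B replaces A's single interleaved guarded pass by: find the fixed prefix, partition the
-- tail around the line, and check the two rebuilt sequences strictly increasing (objective: simpler).

-- ===== PORT A =====
-- first loop of A: walks (idx, val) pairs; fixed points go to bottom_seq, the first
-- non-fixed value becomes the singleton top_seq and the loop breaks (the min_height
-- test A performs before breaking is applied to top_seq's head right after, same result).
def incLoop1 (l : List Int) (idx : Int) (bottom : List Int) : List Int × List Int :=
  match l with
  | [] => (bottom, [])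
  | v :: rest => if v = idx then incLoop1 rest (idx + 1) (bottom ++ [v]) else (bottom, [v])

-- second loop of A over cperm[start_index:], carrying bottom_seq and top_seq;
-- bottom_seq[-1]/top_seq[-1] become getLast? (top_seq is never empty: it holds line).
def incLoop2 (l : List Int) (line : Int) (bottom top : List Int) : Bool :=
  match l with
  | [] => true
  | v :: rest =>
    if v < line then
      match bottom.getLast? with
      | none => incLoop2 rest line ([v] ++ [v]) top      -- append inside the guard, then the unconditional append
      | some b => if v ≤ b then false else incLoop2 rest line (bottom ++ [v]) top
    else
      if v ≤ top.getLast?.getD 0 then false else incLoop2 rest line bottom (top ++ [v])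

def inc_inc (cperm : List Int) (min_height : Int) : Bool :=
  let st := incLoop1 cperm 0 []
  match st.2 with
  | [] => true                                            -- "if not top_seq: return True"
  | line :: _ =>
    if line < min_height then false                       -- A's in-loop check before the break
    else incLoop2 (cperm.drop (st.1.length + 1)) line st.1 st.2   -- cperm[start_index:] with start_index ≥ 0 = drop

-- ===== PORT B =====
-- _strict_inc: all consecutive pairs strictly increasing (zip xs xs[1:]).
def strictInc : List Int → Bool
  | x :: y :: rest => decide (x < y) && strictInc (y :: rest)
  | _ => true

-- the while loop of B: length of the fixed-point prefix
def fixlen (l : List Int) (idx : Int) : Nat :=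
  match l with
  | [] => 0
  | v :: rest => if v = idx then fixlen rest (idx + 1) + 1 else 0

def inc_inc_alt (cperm : List Int) (min_height : Int) : Bool :=
  let k := fixlen cperm 0
  match cperm.drop k with                                 -- rest = cperm[k:], k ≥ 0 so slice = drop
  | [] => true
  | line :: tail =>                                       -- line, *tail = rest
    if line < min_height then false
    else
      let bottom := (List.range k).map (fun (i : Nat) => (i : Int)) ++ tail.filter (fun v => decide (v < line))
      let top := line :: tail.filter (fun v => decide (line ≤ v))
      strictInc bottom && strictInc top

-- ===== PRECONDITION & SPEC =====
def Spec_inc_inc (cperm : List Int) (min_height : Int) (out : Bool) : Prop := out = inc_inc_alt cperm min_height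
instance (cperm : List Int) (min_height : Int) (out : Bool) : Decidable (Spec_inc_inc cperm min_height out) := by unfold Spec_inc_inc; infer_instance

-- ===== CLAIM (what is proved, stated in full; the proofs are below) =====
def Claim_equal_inc_inc : Prop := ∀ (cperm : List Int) (min_height : Int), Dom_inc_inc cperm min_height → Spec_inc_inc cperm min_height (inc_inc cperm min_height)

-- ===== LEMMAS AND PROOFS =====

-- checking "strictly increasing given an optional previous element"
def chkB : Option Int → List Int → Bool
  | _, [] => true
  | none, x :: rest => chkB (some x) rest
  | some p, x :: rest => if p < x then chkB (some x) rest else false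

lemma strictInc_eq_chkB (xs : List Int) : strictInc xs = chkB none xs := by
  match xs with
  | [] => rfl
  | [x] => rfl
  | x :: y :: rest =>
      have ih := strictInc_eq_chkB (y :: rest)
      simp only [strictInc, chkB, ih]
      by_cases h : x < y <;> simp [h]

lemma getLast?_cons_or (x : Int) (xs : List Int) :
    (x :: xs).getLast? = xs.getLast?.or (some x) := by
  induction xs generalizing x with
  | nil => simp
  | cons y ys ih =>
      rw [List.getLast?_cons_cons, ih y]
      cases h : ys.getLast? <;> simp

lemma chkB_append (xs ys : List Int) (p : Option Int) :
    chkB p (xs ++ ys) = (chkB p xs && chkB (xs.getLast?.or p) ys) := by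
  induction xs generalizing p with
  | nil => simp [chkB]
  | cons x xs ih =>
      cases p with
      | none =>
          simp only [List.cons_append, chkB]
          rw [ih, getLast?_cons_or]
          cases h : xs.getLast? <;> simp
      | some q =>
          simp only [List.cons_append, chkB]
          by_cases h : q < x
          · rw [if_pos h, if_pos h, ih, getLast?_cons_or]
            cases h2 : xs.getLast? <;> simp
          · simp [h]

lemma mapRange_getLast? (k : Nat) :
    ((List.range k).map (fun (i : Nat) => (i : Int))).getLast? =
      if k = 0 then none else some ((k : Int) - 1) := by
  cases k with
  | zero => simp
  | succ n =>
      rw [List.range_succ, List.map_append]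
      simp [List.getLast?_concat]

lemma chkB_mapRange (k : Nat) : chkB none ((List.range k).map (fun (i : Nat) => (i : Int))) = true := by
  induction k with
  | zero => rfl
  | succ n ih =>
      rw [List.range_succ, List.map_append, chkB_append, ih, mapRange_getLast?]
      by_cases h : n = 0
      · simp [h, chkB]
      · have hlt : ((n : Int) - 1) < ((n : Int)) := by omega
        simp [h, chkB, hlt]

-- incLoop2 only looks at the last elements of bottom and top
lemma incLoop2_eq_chk (l : List Int) (line t : Int) (bottom top : List Int)
    (ht : top.getLast? = some t) :
    incLoop2 l line bottom top =
      (chkB bottom.getLast? (l.filter (fun v => decide (v < line))) &&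
       chkB (some t) (l.filter (fun v => decide (line ≤ v)))) := by
  induction l generalizing bottom top t with
  | nil => simp [incLoop2, chkB]
  | cons v rest ih =>
      by_cases hv : v < line
      · have hv' : ¬ line ≤ v := by omega
        cases hb : bottom.getLast? with
        | none =>
            rw [show incLoop2 (v :: rest) line bottom top = incLoop2 rest line ([v] ++ [v]) top from by
              simp [incLoop2, hv, hb]]
            rw [ih t ([v] ++ [v]) top ht]
            simp [hv, hv', chkB]
        | some b =>
            by_cases hle : v ≤ b
            · have hnb : ¬ b < v := by omega
              simp [incLoop2, hv, hb, hle, hv', chkB, hnb]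
            · have hbv : b < v := by omega
              rw [show incLoop2 (v :: rest) line bottom top = incLoop2 rest line (bottom ++ [v]) top from by
                simp [incLoop2, hv, hb, hle]]
              rw [ih t (bottom ++ [v]) top ht]
              simp [hv, hv', chkB, hbv]
      · have hv' : line ≤ v := by omega
        by_cases hle : v ≤ t
        · have hnt : ¬ t < v := by omega
          simp [incLoop2, hv, hv', ht, hle, chkB, hnt]
        · have htv : t < v := by omega
          rw [show incLoop2 (v :: rest) line bottom top = incLoop2 rest line bottom (top ++ [v]) from by
            simp [incLoop2, hv, ht, hle]]
          rw [ih v bottom (top ++ [v]) (by simp)]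
          simp [hv, hv', chkB, htv]

-- incLoop1 computes the fixed prefix and the first offender
lemma incLoop1_eq (l : List Int) (idx : Int) (bottom : List Int) :
    incLoop1 l idx bottom =
      (bottom ++ (List.range (fixlen l idx)).map (fun (i : Nat) => idx + (i : Int)),
       (l.drop (fixlen l idx)).take 1) := by
  induction l generalizing idx bottom with
  | nil => simp [incLoop1, fixlen]
  | cons v rest ih =>
      by_cases hv : v = idx
      · simp only [incLoop1, fixlen, hv, if_true]
        rw [ih]
        have hlist : (idx :: (List.range (fixlen rest (idx + 1))).map (fun (i : Nat) => (idx + 1) + (i : Int)))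
            = (List.range (fixlen rest (idx + 1) + 1)).map (fun (i : Nat) => idx + (i : Int)) := by
          rw [List.range_succ_eq_map, List.map_cons, List.map_map]
          congr 1
          · omega
          · apply List.map_congr_left; intro a _
            simp only [Function.comp_apply]
            omega
        simp only [Prod.mk.injEq]
        refine ⟨?_, by simp⟩
        rw [List.append_assoc, List.singleton_append, hlist]
      · simp [incLoop1, fixlen, hv]

theorem inc_inc_eq_alt (cperm : List Int) (min_height : Int) :
    inc_inc cperm min_height = inc_inc_alt cperm min_height := by
  unfold inc_inc inc_inc_alt
  have h1 := incLoop1_eq cperm 0 []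
  have hmap : (List.range (fixlen cperm 0)).map (fun (i : Nat) => (0 : Int) + (i : Int)) =
      (List.range (fixlen cperm 0)).map (fun (i : Nat) => (i : Int)) := by
    apply List.map_congr_left; intro a _; omega
  rw [h1]
  simp only [List.nil_append, hmap]
  set k := fixlen cperm 0 with hk
  cases hd : cperm.drop k with
  | nil => simp
  | cons line tail =>
      simp only [List.take_succ_cons, List.take_zero]
      by_cases hm : line < min_height
      · simp [hm]
      · simp only [hm, if_false]
        have hlen : ((List.range k).map (fun (i : Nat) => (i : Int))).length = k := by simp
        have hdrop : cperm.drop (k + 1) = tail := by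
          have h2 : (cperm.drop k).drop 1 = cperm.drop (k + 1) := by
            rw [List.drop_drop]
          rw [← h2, hd]
          rfl
        rw [hlen, hdrop]
        rw [incLoop2_eq_chk tail line line _ [line] (by simp)]
        rw [strictInc_eq_chkB, strictInc_eq_chkB, chkB_append, chkB_mapRange]
        simp only [Bool.true_and, chkB, Option.or_none]

-- ===== VERDICT (by name: the statement is the Claim_ definition above) =====
theorem inc_inc_spec : Claim_equal_inc_inc := by
  intro cperm min_height _
  unfold Spec_inc_inc
  exact inc_inc_eq_alt cperm min_height
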